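-- pv_equiv track=rewrite | github.com/JJLLWW/google_kick_start | 2014/roundB/task1.py | solve
-- ===== SOURCE A (Python) =====
-- import math
--
-- def comb(n, k):
--     return math.factorial(n)//(math.factorial(k)*math.factorial(n-k))
--
-- def solve(M, N):
--     total_arr = M**N
--     key_missing_arr = 0
--     for i in range(1, M):
--         key_missing_arr += (-1)**(i-1)*comb(M, M-i)*(M-i)**N
--     n_pass = total_arr - key_missing_arr
--     n_pass_mod = n_pass % (10**9 + 7)
--     return n_pass_mod
-- ===== SOURCE B (Python) =====
-- def solve(M, N):
--     MOD = 10**9 + 7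
--     # Dynamic programming on the surjection recurrence
--     # surj(n, m) = m * (surj(n-1, m-1) + surj(n-1, m)),  surj(0, 0) = 1.
--     f = [1] + [0] * M          # f[m] = surjections of 0 keys onto m doors
--     for _ in range(N):
--         f = [0] + [m * (a + b) % MOD for m, (a, b) in enumerate(zip(f, f[1:]), 1)]
--     return f[M]
-- ===== Notes on version B (the rewrite author's own statement) =====
-- stated objective: alternative
-- what changed: B abandons inclusion-exclusion entirely: it counts surjections by dynamic programming on the recurrence surj(n,m)=m*(surj(n-1,m-1)+surj(n-1,m)), keeping one row of M+1 modular values per key, with no binomial coefficients, no factorials and no exponentiation, instead of A's O(M)-term alternating sum of exact big-integer powers and factorial-quotient binomials.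
-- intended difference: For N=0 and M>=1 A returns +1 or 1000000006 (an artifact of 0**0=1 in its truncated inclusion-exclusion), while B returns 0, the true number of ways to cover M>=1 doors with 0 keys. — e.g. on solve(1, 0): A returns 1, B returns 0
-- outside the precondition, e.g. on solve(2, -1): A returns 1000000005.5, B returns 0; on solve(-2, 3): A returns 999999999, B raises IndexError
import Mathlib
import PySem

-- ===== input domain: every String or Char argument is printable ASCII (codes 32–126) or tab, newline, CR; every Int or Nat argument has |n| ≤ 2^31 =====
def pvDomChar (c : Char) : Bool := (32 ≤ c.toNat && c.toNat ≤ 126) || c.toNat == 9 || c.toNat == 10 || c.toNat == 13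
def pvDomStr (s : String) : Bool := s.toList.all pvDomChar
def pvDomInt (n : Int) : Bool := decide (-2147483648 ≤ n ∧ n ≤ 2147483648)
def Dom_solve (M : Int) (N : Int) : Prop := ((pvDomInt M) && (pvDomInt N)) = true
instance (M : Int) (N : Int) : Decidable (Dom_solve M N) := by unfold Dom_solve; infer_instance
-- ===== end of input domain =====

-- B replaces A's inclusion-exclusion sum (exact big-integer powers and factorial binomials)
-- by a dynamic program on the surjection recurrence surj(n,m) = m*(surj(n-1,m-1)+surj(n-1,m)),
-- one row of M+1 modular values per key: no binomials, no factorials, no exponentiation.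

-- ===== PORT A =====
-- math.factorial: exact for n ≥ 0 (A only calls it with nonnegative arguments under Pre_).
def pyFact (n : Int) : Int := (Nat.factorial n.toNat : Int)

def comb (n : Int) (k : Int) : Int :=
  PySem.Int.floordiv (pyFact n) (pyFact k * pyFact (n - k))

-- M**N ported as M ^ N.toNat: exact for N ≥ 0 (Pre_); Python '%' by the positive
-- modulus is PySem.Int.mod.
def solve (M : Int) (N : Int) : Int :=
  let total_arr := M ^ N.toNat
  let key_missing_arr := (PySem.List.pyRange 1 M 1).foldl
    (fun acc i => acc + (-1 : Int) ^ (i - 1).toNat * comb M (M - i) * (M - i) ^ N.toNat) 0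
  PySem.Int.mod (total_arr - key_missing_arr) (10 ^ 9 + 7)

-- ===== PORT B =====
-- one DP step of Source B: new row = [0] + [m*(a+b) % MOD for m,(a,b) in enumerate(zip(f, f[1:]), 1)]
-- (f[1:] is f.drop 1 — exact for the slice start 1; enumerate(…, 1) is zipIdx 1)
def bStep (f : List Int) : List Int :=
  0 :: (((f.zip (f.drop 1)).zipIdx 1).map
    (fun x => PySem.Int.mod ((x.2 : Int) * (x.1.1 + x.1.2)) (10 ^ 9 + 7)))

-- f = [1] + [0]*M; for _ in range(N): f = bStep f; return f[M]
-- (f[M] via pyGet?; under Pre_ the index M is always in range, so the default is unreachable)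
def solve_alt (M : Int) (N : Int) : Int :=
  (PySem.List.pyGet?
    ((PySem.List.pyRange 0 N 1).foldl (fun g _ => bStep g)
      (1 :: List.replicate M.toNat 0)) M).getD 0

-- ===== PRECONDITION & SPEC =====
-- Pre_ excludes N < 0 (there Python A returns a float, e.g. solve(2,-1) = 1000000005.5, never an
-- int) and M < 0, which is outside the natural domain of door counts: A's value M**N mod p there
-- is an artifact of its formula, and B's own algorithm raises IndexError for M ≤ -2.
def Pre_solve (M : Int) (N : Int) : Prop := 0 ≤ M ∧ 0 ≤ N
instance (M : Int) (N : Int) : Decidable (Pre_solve M N) := by unfold Pre_solve; infer_instance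
def pvWitness_solve : Int × Int := (3, 2)

-- For N = 0 and M ≥ 1, A returns 1 or 1000000006 (an artifact of 0**0 = 1 in its truncated
-- inclusion-exclusion), while B returns 0, the true number of ways to cover M ≥ 1 doors with 0 keys.
def D_solve (M : Int) (N : Int) : Prop := N = 0 ∧ 1 ≤ M
instance (M : Int) (N : Int) : Decidable (D_solve M N) := by unfold D_solve; infer_instance

def Spec_solve (M : Int) (N : Int) (out : Int) : Prop := ¬ D_solve M N → out = solve_alt M N
instance (M : Int) (N : Int) (out : Int) : Decidable (Spec_solve M N out) := by unfold Spec_solve; infer_instance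

def pvDiffWitness_solve : Int × Int := (1, 0)
def pvDiffWitnessOut_solve : Int × Int := (1, 0)

-- ===== CLAIM (what is proved, stated in full; the proofs are below) =====
def Claim_unchanged_solve : Prop := ∀ (M : Int) (N : Int), Dom_solve M N → Pre_solve M N → Spec_solve M N (solve M N)
def Claim_changed_solve : Prop := Dom_solve (pvDiffWitness_solve.1) (pvDiffWitness_solve.2) ∧ Pre_solve (pvDiffWitness_solve.1) (pvDiffWitness_solve.2) ∧ D_solve (pvDiffWitness_solve.1) (pvDiffWitness_solve.2) ∧ solve (pvDiffWitness_solve.1) (pvDiffWitness_solve.2) = pvDiffWitnessOut_solve.1 ∧ solve_alt (pvDiffWitness_solve.1) (pvDiffWitness_solve.2) = pvDiffWitnessOut_solve.2 ∧ pvDiffWitnessOut_solve.1 ≠ pvDiffWitnessOut_solve.2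
def Claim_exact_solve : Prop := ∀ (M : Int) (N : Int), Dom_solve M N → Pre_solve M N → D_solve M N → solve M N ≠ solve_alt M N

-- ===== LEMMAS AND PROOFS =====

-- A-side reference value: partial inclusion-exclusion sum Σ_{k<j} (-1)^k C(m,k) (M-k)^n
def S (M : Int) (m n : Nat) : Nat → Int
  | 0 => 0
  | j + 1 => S M m n j + (-1 : Int) ^ j * (m.choose j : Int) * (M - (j : Int)) ^ n

-- full inclusion-exclusion sum Σ_{i≤m} (-1)^i C(m,i) (m-i)^n, the surjection count
def Tfull (m n : Nat) : Int :=
  ∑ i ∈ Finset.range (m + 1), (-1 : Int) ^ i * (m.choose i : Int) * ((m : Int) - i) ^ n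

lemma comb_eq (m i : Nat) (h : i ≤ m) :
    comb (m : Int) ((m : Int) - (i : Int)) = (m.choose i : Int) := by
  unfold comb pyFact
  have h1 : ((m : Int) - (i : Int)).toNat = m - i := by omega
  have h2 : ((m : Int) - ((m : Int) - (i : Int))).toNat = i := by omega
  have h3 : ((m : Int)).toNat = m := by omega
  rw [h1, h2, h3]
  rw [← Nat.cast_mul, PySem.Int.floordiv_natCast]
  have key : m.factorial = m.choose (m - i) * ((m - i).factorial * i.factorial) := by
    have := Nat.choose_mul_factorial_mul_factorial (Nat.sub_le m i)
    rw [Nat.sub_sub_self h] at this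
    rw [← this]; ring
  rw [key, Nat.mul_div_cancel _ (by positivity), Nat.choose_symm h]

lemma Asum (M : Int) (m n : Nat) (hM : M = (m : Int)) :
    ∀ j, j + 1 ≤ m →
      ((List.range j).map (fun (k : Nat) =>
        (-1 : Int) ^ ((1 + (k : Int)) - 1).toNat * comb M (M - (1 + (k : Int)))
          * (M - (1 + (k : Int))) ^ n)).sum
      = M ^ n - S M m n (j + 1) := by
  intro j
  induction j with
  | zero =>
    intro _
    simp [S]
  | succ j ih =>
    intro hj
    rw [List.range_succ, List.map_append, List.sum_append, ih (by omega)]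
    have h1 : ((1 + (j : Int)) - 1).toNat = j := by omega
    have h3 : comb M (M - (1 + (j : Int))) = (m.choose (j + 1) : Int) := by
      rw [hM]
      rw [show (m:Int) - (1 + (j:Int)) = (m:Int) - ((j+1 : Nat):Int) by push_cast; ring]
      exact comb_eq m (j + 1) (by omega)
    show M ^ n - S M m n (j + 1) + ((-1:Int) ^ ((1 + (j:Int)) - 1).toNat * comb M (M - (1 + (j:Int))) * (M - (1 + (j:Int))) ^ n + 0) = M ^ n - S M m n (j + 1 + 1)
    rw [h1, h3]
    show _ = M ^ n - (S M m n (j+1) + (-1:Int) ^ (j+1) * (m.choose (j+1) : Int) * (M - ((j+1 : Nat) : Int)) ^ n)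
    have h4 : M - (1 + (j : Int)) = M - ((j + 1 : Nat) : Int) := by push_cast; ring
    rw [h4, pow_succ]
    ring

lemma solve_eq_S (M : Int) (N : Int) (m : Nat) (hM : M = (m : Int)) (hm : 1 ≤ m) :
    solve M N = S M m N.toNat m % (10 ^ 9 + 7) := by
  unfold solve
  rw [PySem.Int.mod_eq_emod_of_pos (by norm_num)]
  rw [PySem.List.foldl_add, PySem.List.pyRange_one, List.map_map]
  have hlen : (M - 1).toNat = m - 1 := by omega
  rw [hlen]
  have := Asum M m N.toNat hM (m - 1) (by omega)
  rw [show (m - 1) + 1 = m from by omega] at this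
  simp only [Function.comp_def] at this ⊢
  rw [this]
  ring_nf

-- S as a Finset sum, and Tfull = S plus the (zero for n ≥ 1) i = m term
lemma S_eq_sum (M : Int) (m n : Nat) :
    ∀ j, S M m n j = ∑ i ∈ Finset.range j, (-1 : Int) ^ i * (m.choose i : Int) * (M - i) ^ n := by
  intro j
  induction j with
  | zero => simp [S]
  | succ j ih => rw [Finset.sum_range_succ, ← ih]; rfl

lemma Tfull_eq_S (m n : Nat) (hn : 1 ≤ n) :
    Tfull m n = S ((m : Int)) m n m := by
  rw [S_eq_sum, Tfull, Finset.sum_range_succ, sub_self, zero_pow (by omega), mul_zero, add_zero]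

-- absorption identity: C(m+1,i) * (m+1-i) = (m+1) * C(m,i), over Int
lemma choose_absorb (m i : Nat) :
    ((m + 1).choose i : Int) * ((m : Int) + 1 - i) = ((m : Int) + 1) * (m.choose i : Int) := by
  by_cases hi : i ≤ m
  · have h : i ≤ m + 1 := by omega
    have nat_id : (m + 1).choose i * (m + 1 - i) = (m + 1) * m.choose i := by
      have h1 : (m + 1).choose i = (m + 1).choose (m + 1 - i) := (Nat.choose_symm h).symm
      have h2 : (m + 1) * m.choose (m - i) = (m + 1).choose (m - i + 1) * (m - i + 1) :=
        Nat.add_one_mul_choose_eq m (m - i)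
      rw [h1, show m + 1 - i = m - i + 1 from by omega, ← h2, Nat.choose_symm hi]
    have hcast : ((m : Int) + 1 - i) = ((m + 1 - i : Nat) : Int) := by omega
    rw [hcast, ← Nat.cast_mul, nat_id]
    push_cast; ring
  · by_cases h2 : i = m + 1
    · subst h2
      rw [Nat.choose_self, Nat.choose_succ_self]
      push_cast; ring
    · rw [Nat.choose_eq_zero_of_lt (by omega), Nat.choose_eq_zero_of_lt (by omega)]
      simp

-- the in-between sum U m n = Σ_{i≤m} (-1)^i C(m,i) (m+1-i)^n
lemma Trec1 (m n : Nat) :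
    Tfull (m + 1) (n + 1)
      = ((m : Int) + 1) * ∑ i ∈ Finset.range (m + 1),
          (-1 : Int) ^ i * (m.choose i : Int) * ((m : Int) + 1 - i) ^ n := by
  unfold Tfull
  rw [Finset.mul_sum, Finset.sum_range_succ]
  have hz : ((-1 : Int) ^ (m + 1) * (((m + 1).choose (m + 1) : Nat) : Int)
      * (((m + 1 : Nat) : Int) - (((m + 1 : Nat) : Nat) : Int)) ^ (n + 1)) = 0 := by
    rw [sub_self, zero_pow (by omega)]; ring
  rw [hz, add_zero]
  apply Finset.sum_congr rfl
  intro i _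
  have hx : (((m + 1 : Nat) : Int) - i) = ((m : Int) + 1 - i) := by push_cast; ring
  rw [hx, pow_succ]
  have := choose_absorb m i
  calc (-1 : Int) ^ i * ((m + 1).choose i : Int) * (((m : Int) + 1 - i) ^ n * ((m : Int) + 1 - i))
      = (-1 : Int) ^ i * (((m + 1).choose i : Int) * ((m : Int) + 1 - i)) * ((m : Int) + 1 - i) ^ n := by ring
    _ = (-1 : Int) ^ i * (((m : Int) + 1) * (m.choose i : Int)) * ((m : Int) + 1 - i) ^ n := by rw [this]
    _ = ((m : Int) + 1) * ((-1 : Int) ^ i * (m.choose i : Int) * ((m : Int) + 1 - i) ^ n) := by ring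

lemma Trec2 (m n : Nat) :
    (∑ i ∈ Finset.range (m + 1), (-1 : Int) ^ i * (m.choose i : Int) * ((m : Int) + 1 - i) ^ n)
      = Tfull (m + 1) n + Tfull m n := by
  -- expand Tfull (m+1) n by splitting off the i = 0 term and using Pascal's rule
  have hT1 : Tfull (m + 1) n
      = (∑ i ∈ Finset.range (m + 1),
          ((-1 : Int) ^ (i + 1) * (m.choose i : Int) * ((m : Int) - i) ^ n
            + (-1 : Int) ^ (i + 1) * (m.choose (i + 1) : Int) * ((m : Int) - i) ^ n))
        + ((m : Int) + 1) ^ n := by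
    unfold Tfull
    rw [Finset.sum_range_succ']
    congr 1
    · apply Finset.sum_congr rfl
      intro i _
      rw [Nat.choose_succ_succ]
      have hx : (((m + 1 : Nat) : Int) - ((i + 1 : Nat) : Int)) = ((m : Int) - i) := by push_cast; ring
      push_cast [hx]
      ring
    · simp
  have hsplit := hT1
  rw [Finset.sum_add_distrib] at hsplit
  have hA1 : (∑ i ∈ Finset.range (m + 1), (-1 : Int) ^ (i + 1) * (m.choose i : Int) * ((m : Int) - i) ^ n)
      = -Tfull m n := by
    unfold Tfull
    rw [← Finset.sum_neg_distrib]
    apply Finset.sum_congr rfl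
    intro i _
    rw [pow_succ]
    ring
  -- the shifted-binomial sum, with its vanishing last term dropped
  have hA2 : (∑ i ∈ Finset.range (m + 1), (-1 : Int) ^ (i + 1) * (m.choose (i + 1) : Int) * ((m : Int) - i) ^ n)
      = ∑ i ∈ Finset.range m, (-1 : Int) ^ (i + 1) * (m.choose (i + 1) : Int) * ((m : Int) - i) ^ n := by
    rw [Finset.sum_range_succ, Nat.choose_succ_self]
    simp
  have hU : (∑ i ∈ Finset.range (m + 1), (-1 : Int) ^ i * (m.choose i : Int) * ((m : Int) + 1 - i) ^ n)
      = (∑ i ∈ Finset.range m, (-1 : Int) ^ (i + 1) * (m.choose (i + 1) : Int) * ((m : Int) - i) ^ n)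
        + ((m : Int) + 1) ^ n := by
    rw [Finset.sum_range_succ']
    congr 1
    · apply Finset.sum_congr rfl
      intro i _
      have hx : ((m : Int) + 1 - ((i + 1 : Nat) : Int)) = ((m : Int) - i) := by push_cast; ring
      push_cast [hx]
      ring
    · simp
  rw [hU, ← hA2]
  rw [hsplit, hA1]
  ring

-- the surjection recurrence for Tfull
lemma Trec (m n : Nat) :
    Tfull (m + 1) (n + 1) = ((m : Int) + 1) * (Tfull m n + Tfull (m + 1) n) := by
  rw [Trec1, Trec2]; ring

lemma Tzero (m : Nat) : Tfull m 0 = if m = 0 then 1 else 0 := by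
  unfold Tfull
  have h : ∀ i ∈ Finset.range (m + 1),
      (-1 : Int) ^ i * (m.choose i : Int) * ((m : Int) - i) ^ 0 = (-1 : Int) ^ i * (m.choose i : Int) := by
    intro i _; rw [pow_zero, mul_one]
  rw [Finset.sum_congr rfl h, Int.alternating_sum_range_choose]

-- the DP row after n steps
def Lrow (Mn n : Nat) : List Int :=
  (List.range (Mn + 1)).map (fun m => Tfull m n % (10 ^ 9 + 7))

lemma modmul (c a b : Int) (p : Int) :
    (c * (a % p + b % p)) % p = (c * (a + b)) % p := by
  conv_lhs => rw [Int.mul_emod, Int.add_emod, Int.emod_emod_of_dvd a dvd_rfl,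
    Int.emod_emod_of_dvd b dvd_rfl]
  conv_rhs => rw [Int.mul_emod, Int.add_emod]

lemma bStep_Lrow (Mn n : Nat) : bStep (Lrow Mn n) = Lrow Mn (n + 1) := by
  have hlen : (Lrow Mn n).length = Mn + 1 := by simp [Lrow]
  apply List.ext_getElem
  · simp [bStep, Lrow]
  · intro i h1 h2
    match i with
    | 0 =>
      simp only [bStep, List.getElem_cons_zero, Lrow, List.getElem_map, List.getElem_range]
      have : Tfull 0 (n + 1) = 0 := by
        unfold Tfull
        simp [zero_pow (by omega : n + 1 ≠ 0)]
      rw [this]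
      simp
    | k + 1 =>
      have hlt : k + 1 < Mn + 1 := by
        simpa [bStep, hlen] using h1
      simp only [bStep, List.getElem_cons_succ, List.getElem_map, List.getElem_zipIdx,
        List.getElem_zip, List.getElem_drop]
      simp only [Lrow, List.getElem_map, List.getElem_range]
      rw [PySem.Int.mod_eq_emod_of_pos (by norm_num)]
      rw [modmul]
      have : Tfull (k + 1) (n + 1) = ((k : Int) + 1) * (Tfull k n + Tfull (k + 1) n) := Trec k n
      rw [show 1 + k = k + 1 from Nat.add_comm 1 k, this]
      norm_cast

lemma foldl_const_iterate {α β : Type} (g : α → α) :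
    ∀ (xs : List β) (x : α), xs.foldl (fun a _ => g a) x = g^[xs.length] x := by
  intro xs
  induction xs with
  | nil => intro x; rfl
  | cons y ys ih =>
    intro x
    rw [List.foldl_cons, ih, List.length_cons, Function.iterate_succ_apply]

lemma iterate_bStep (Mn : Nat) : ∀ n, bStep^[n] (Lrow Mn 0) = Lrow Mn n := by
  intro n
  induction n with
  | zero => rfl
  | succ n ih => rw [Function.iterate_succ_apply', ih, bStep_Lrow]

lemma Lrow_zero (Mn : Nat) : Lrow Mn 0 = 1 :: List.replicate Mn 0 := by
  apply List.ext_getElem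
  · simp [Lrow]
  · intro i h1 h2
    match i with
    | 0 => simp [Lrow, Tzero]
    | k + 1 =>
      have hk : k < Mn := by simpa [Lrow] using h1
      simp [Lrow, Tzero, List.getElem_replicate]

lemma solve_alt_eq (M N : Int) (m : Nat) (hM : M = (m : Int)) (hN : 0 ≤ N) :
    solve_alt M N = Tfull m N.toNat % (10 ^ 9 + 7) := by
  unfold solve_alt
  have htoNat : ((m : Int)).toNat = m := by omega
  rw [hM, htoNat]
  rw [show (1 : Int) :: List.replicate m 0 = Lrow m 0 from (Lrow_zero m).symm]
  rw [foldl_const_iterate, PySem.List.length_pyRange_one]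
  rw [show (N - 0).toNat = N.toNat from by omega]
  rw [iterate_bStep]
  rw [PySem.List.pyGet?_natCast]
  have hm : m < (Lrow m N.toNat).length := by simp [Lrow]
  rw [List.getElem?_eq_getElem hm]
  simp [Lrow]

-- ===== VERDICT (by name: the statements are the Claim_ definitions above) =====
theorem solve_spec : Claim_unchanged_solve := by
  intro M N _ hpre hnd
  obtain ⟨hm0, hn0⟩ := hpre
  have hM : M = ((M.toNat : Nat) : Int) := by omega
  show solve M N = solve_alt M N
  rw [solve_alt_eq M N M.toNat hM hn0]
  rcases Nat.eq_zero_or_pos M.toNat with hz | hpos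
  · -- M = 0: both sides are 0^N mod p
    have hM0 : M = 0 := by omega
    rw [hz]
    unfold solve
    rw [hM0, PySem.List.pyRange_one_eq_nil (by omega)]
    unfold Tfull
    rw [PySem.Int.mod_eq_emod_of_pos (by norm_num)]
    simp
  · -- M ≥ 1, and ¬D gives N ≥ 1
    have hN1 : 1 ≤ N := by
      by_contra h
      exact hnd ⟨by omega, by omega⟩
    rw [solve_eq_S M N M.toNat hM hpos]
    rw [Tfull_eq_S M.toNat N.toNat (by omega), ← hM]

theorem solve_changed : Claim_changed_solve := by
  unfold Claim_changed_solve; decide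

theorem solve_tight : Claim_exact_solve := by
  intro M N _ hpre hd
  obtain ⟨hN0, hM1⟩ := hd
  subst hN0
  have hM : M = ((M.toNat : Nat) : Int) := by omega
  have hpos : 1 ≤ M.toNat := by omega
  rw [solve_alt_eq M 0 M.toNat hM (by omega)]
  rw [solve_eq_S M 0 M.toNat hM hpos]
  have hT : Tfull M.toNat 0 = 0 := by rw [Tzero, if_neg (by omega)]
  have h1 : Tfull M.toNat 0
      = S ((M.toNat : Nat) : Int) M.toNat 0 M.toNat + (-1 : Int) ^ M.toNat := by
    rw [S_eq_sum, Tfull, Finset.sum_range_succ]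
    simp
  rw [← hM] at h1
  have hS : S M M.toNat 0 M.toNat = -(-1 : Int) ^ M.toNat := by
    rw [hT] at h1; linarith
  rw [show (0 : Int).toNat = 0 from rfl, hS, hT]
  rcases Nat.even_or_odd M.toNat with he | ho
  · rw [he.neg_one_pow]; decide
  · rw [ho.neg_one_pow]; decide
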